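-- pv_equiv track=rewrite | github.com/Jacks-Su/Algorithm | Select sort/number.py | numArr
-- ===== SOURCE A (Python) =====
-- def numArr(Arr):
--
--     if len(Arr) == 0:
--         num = 0
--         return num
--
--     else:
--         Arr.pop(0)
--         num = 1 + numArr(Arr)
--         return num
-- ===== SOURCE B (Python) =====
-- def numArr(Arr):
--     count = 0
--     while Arr:
--         Arr.pop(0)
--         count += 1
--     return count
-- ===== Notes on version B (the rewrite author's own statement) =====
-- stated objective: simpler
-- what changed: Replaces the self-recursion with a flat iterative while-loop and a counter, keeping the destructive front-popping that empties Arr.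
import Mathlib
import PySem

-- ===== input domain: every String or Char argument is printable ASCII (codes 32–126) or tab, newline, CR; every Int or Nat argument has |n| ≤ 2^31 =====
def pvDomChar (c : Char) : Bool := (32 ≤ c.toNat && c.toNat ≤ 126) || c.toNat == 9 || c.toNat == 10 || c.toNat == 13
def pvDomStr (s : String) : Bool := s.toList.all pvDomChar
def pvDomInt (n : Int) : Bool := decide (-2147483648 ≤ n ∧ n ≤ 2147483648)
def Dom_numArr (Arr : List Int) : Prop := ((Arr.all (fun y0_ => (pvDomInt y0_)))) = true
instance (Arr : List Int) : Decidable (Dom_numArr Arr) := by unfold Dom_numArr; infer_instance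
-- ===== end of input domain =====

-- B replaces A's self-recursion by an iterative loop with a counter (objective: simpler).
-- Both Pythons destructively empty Arr (pop(0)); the equivalence proved here is about the return value.

-- ===== PORT A =====
-- A: recursion — empty list returns 0, otherwise pop front and return 1 + recursive call on the tail.
def numArr (Arr : List Int) : Int :=
  match Arr with
  | [] => 0
  | _ :: rest => 1 + numArr rest

-- ===== PORT B =====
-- B: while-loop with accumulator 'count'; modelled as a tail-recursive loop over the remaining list.
def numArrLoop (Arr : List Int) (count : Int) : Int :=
  match Arr with
  | [] => count
  | _ :: rest => numArrLoop rest (count + 1)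

def numArr_alt (Arr : List Int) : Int := numArrLoop Arr 0

-- ===== PRECONDITION & SPEC =====
def Spec_numArr (Arr : List Int) (out : Int) : Prop := out = numArr_alt Arr
instance (Arr : List Int) (out : Int) : Decidable (Spec_numArr Arr out) := by unfold Spec_numArr; infer_instance

-- ===== CLAIM (what is proved, stated in full; the proofs are below) =====
def Claim_equal_numArr : Prop := ∀ (Arr : List Int), Dom_numArr Arr → Spec_numArr Arr (numArr Arr)

-- ===== LEMMAS AND PROOFS =====
theorem numArrLoop_eq (Arr : List Int) (c : Int) : numArrLoop Arr c = c + numArr Arr := by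
  induction Arr generalizing c with
  | nil => simp [numArrLoop, numArr]
  | cons x rest ih => simp [numArrLoop, numArr, ih]; ring

-- ===== VERDICT (by name: the statement is the Claim_ definition above) =====
theorem numArr_spec : Claim_equal_numArr := by
  intro Arr _
  unfold Spec_numArr numArr_alt
  rw [numArrLoop_eq]
  ring
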